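-- pv_equiv track=rewrite | github.com/kmzn128/atcoder | b168/d.py | Main
-- ===== SOURCE A (Python) =====
-- from collections import deque
--
-- def bfs(graph, start_node, parent):
--     next_nodes = deque([])
--     seen_nodes = set()
--
--     next_nodes.append(start_node)
--     seen_nodes.add(start_node)
--     parent[start_node] = 0
--     while next_nodes:
--         node = next_nodes.popleft()
-- #         if node == key:
-- #             return node
--         if node in graph:
--             for n in graph[node]:
--                 if not n in seen_nodes:
--                     next_nodes.append(n)
--                     seen_nodes.add(n)
--                     parent[n] = node
--     return
--
-- def Main(N, M, A, B):
--     g = {}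
--     for i in range(M):
--         if A[i] not in g:
--             g[A[i]] = []
--         if B[i] not in g:
--             g[B[i]] = []
--         g[A[i]].append(B[i])
--         g[B[i]].append(A[i])
--     parent = {}
--     bfs(g, 1, parent)
--     ans = []
--     for i in range(2, N+1):
--         ans.append(parent[i])
--     return 'Yes', ans
-- ===== SOURCE B (Python) =====
-- def Main(N, M, A, B):
--     edges = [(A[i], B[i]) for i in range(M)]
--     parent = {1: 0}
--     order = [1]
--     head = 0
--     while head < len(order):
--         u = order[head]
--         head += 1
--         for a, b in edges:
--             if a == u and b not in parent:
--                 parent[b] = u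
--                 order.append(b)
--             if b == u and a not in parent:
--                 parent[a] = u
--                 order.append(a)
--     return 'Yes', [parent[i] for i in range(2, N + 1)]
-- ===== Notes on version B (the rewrite author's own statement) =====
-- stated objective: alternative
-- what changed: Drops the adjacency-dict construction and the deque/seen-set entirely: B keeps a grow-only discovery list scanned by a head cursor, expands each node by a linear scan over the raw edge list (checking both endpoints per edge), and uses the parent dict itself as the visited set; discovery order and parents are identical.
import Mathlib
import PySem

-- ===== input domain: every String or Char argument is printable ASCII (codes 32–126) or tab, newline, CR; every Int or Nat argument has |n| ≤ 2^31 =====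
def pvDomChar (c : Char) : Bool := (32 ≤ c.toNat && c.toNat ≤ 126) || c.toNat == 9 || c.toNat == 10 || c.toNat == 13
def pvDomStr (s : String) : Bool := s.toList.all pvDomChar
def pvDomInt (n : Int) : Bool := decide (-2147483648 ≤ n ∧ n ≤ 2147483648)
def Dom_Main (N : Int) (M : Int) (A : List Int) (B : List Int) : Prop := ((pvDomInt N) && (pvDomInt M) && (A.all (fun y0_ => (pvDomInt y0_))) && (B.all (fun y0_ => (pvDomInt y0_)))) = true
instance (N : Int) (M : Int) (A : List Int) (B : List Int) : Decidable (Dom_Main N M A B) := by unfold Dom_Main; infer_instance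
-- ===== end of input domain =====

-- B replaces A's adjacency-dict + deque + seen-set BFS by a head-cursor scan of a grow-only
-- discovery list that expands each node by a linear scan over the raw edge list and uses the
-- parent dict itself as the visited set; same discovery order, hence the same parents.

-- ===== PORT A =====
-- A's bfs: while-loop popping the deque head; fuel 2*|keys|+1 bounds the number of pops
-- (each pop removes a queue entry; every enqueue marks a fresh key seen), proved sufficient below.
def bfsA (g : PySem.Dict Int (List Int)) : Nat → List Int → PySem.Set Int → PySem.Dict Int Int → PySem.Dict Int Int
  | 0, _, _, parent => parent
  | _ + 1, [], _, parent => parent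
  | f + 1, node :: q, seen, parent =>
      let st :=
        if g.contains node then
          (g.getD node []).foldl
            (fun (st : List Int × PySem.Set Int × PySem.Dict Int Int) n =>
              if st.2.1.contains n then st
              else (st.1 ++ [n], st.2.1.add n, st.2.2.insert n node))
            (q, seen, parent)
        else (q, seen, parent)
      bfsA g f st.1 st.2.1 st.2.2

def Main (N : Int) (M : Int) (A : List Int) (B : List Int) : String × List Int :=
  let g := (PySem.List.pyRange 0 M 1).foldl
    (fun (g : PySem.Dict Int (List Int)) i =>
      let a := PySem.List.pyGetD A i 0
      let b := PySem.List.pyGetD B i 0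
      let g := if g.contains a then g else g.insert a []
      let g := if g.contains b then g else g.insert b []
      let g := g.insert a (g.getD a [] ++ [b])
      g.insert b (g.getD b [] ++ [a]))
    PySem.Dict.empty
  let parent := PySem.Dict.empty.insert 1 0
  let parent := bfsA g (2 * g.size + 1) [1] (PySem.Set.add PySem.Set.empty 1) parent
  -- parent[i]: Pre_Main guarantees the key is present (Python raises KeyError otherwise)
  ("Yes", (PySem.List.pyRange 2 (N + 1) 1).foldl (fun ans i => ans ++ [parent.getD i 0]) [])

-- ===== PORT B =====
-- B's while-loop over the head cursor: one pop per step, each node expanded by a scan of the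
-- whole edge list; fuel 2*|edges|+1 bounds the number of pops, proved sufficient below.
def bfsAlt (E : List (Int × Int)) : Nat → List Int → PySem.Dict Int Int → PySem.Dict Int Int
  | 0, _, parent => parent
  | _ + 1, [], parent => parent
  | f + 1, u :: q, parent =>
      let st := E.foldl
        (fun (st : List Int × PySem.Dict Int Int) e =>
          let st := if e.1 == u && !st.2.contains e.2 then (st.1 ++ [e.2], st.2.insert e.2 u) else st
          if e.2 == u && !st.2.contains e.1 then (st.1 ++ [e.1], st.2.insert e.1 u) else st)
        (q, parent)
      bfsAlt E f st.1 st.2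

def Main_alt (N : Int) (M : Int) (A : List Int) (B : List Int) : String × List Int :=
  let edges := (PySem.List.pyRange 0 M 1).map
    (fun i => (PySem.List.pyGetD A i 0, PySem.List.pyGetD B i 0))
  let parent := bfsAlt edges (2 * edges.length + 1) [1] (PySem.Dict.empty.insert 1 0)
  ("Yes", (PySem.List.pyRange 2 (N + 1) 1).map (fun i => parent.getD i 0))

-- ===== PRECONDITION & SPEC =====
-- helper for Pre_: the undirected edge list and its reflexive-transitive closure from vertex 1
def pvEdges (M : Int) (A : List Int) (B : List Int) : List (Int × Int) :=
  (PySem.List.pyRange 0 M 1).map (fun i => (PySem.List.pyGetD A i 0, PySem.List.pyGetD B i 0))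

def pvReachPass (E : List (Int × Int)) (S : PySem.Set Int) : PySem.Set Int :=
  E.foldl (fun S e =>
    if S.contains e.1 then (if S.contains e.2 then S else S.add e.2)
    else if S.contains e.2 then S.add e.1 else S) S

def pvReach (E : List (Int × Int)) : PySem.Set Int :=
  (pvReachPass E)^[2 * E.length + 2] (PySem.Set.add PySem.Set.empty 1)

-- Pre_ excludes inputs where the Python raises: an index i < M beyond A/B (IndexError),
-- and a vertex in 2..N not connected to 1 (KeyError on parent[i]); the latter is stated by
-- counting the reachable (nodup) vertices lying in [2, N], which all of 2..N do iff the count is N-1.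
def Pre_Main (N : Int) (M : Int) (A : List Int) (B : List Int) : Prop :=
  M ≤ (A.length : Int) ∧ M ≤ (B.length : Int) ∧
  (((pvReach (pvEdges M A B)).filter (fun x => decide (2 ≤ x) && decide (x ≤ N))).length : Int)
    = max (N - 1) 0

instance (N : Int) (M : Int) (A : List Int) (B : List Int) : Decidable (Pre_Main N M A B) := by
  unfold Pre_Main; infer_instance

def pvWitness_Main : Int × Int × List Int × List Int := (3, 2, [1, 2], [2, 3])

def Spec_Main (N : Int) (M : Int) (A : List Int) (B : List Int) (out : String × List Int) : Prop := out = Main_alt N M A B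
instance (N : Int) (M : Int) (A : List Int) (B : List Int) (out : String × List Int) : Decidable (Spec_Main N M A B out) := by unfold Spec_Main; infer_instance

-- ===== CLAIM (what is proved, stated in full; the proofs are below) =====
def Claim_equal_Main : Prop := ∀ (N : Int) (M : Int) (A : List Int) (B : List Int), Dom_Main N M A B → Pre_Main N M A B → Spec_Main N M A B (Main N M A B)

-- ===== LEMMAS AND PROOFS =====

abbrev PvSt := List Int × PySem.Set Int × PySem.Dict Int Int
abbrev PvStB := List Int × PySem.Dict Int Int

-- A-side primitives
def pvInner (node : Int) (st : PvSt) (n : Int) : PvSt :=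
  if st.2.1.contains n then st else (st.1 ++ [n], st.2.1.add n, st.2.2.insert n node)

def pvStep (g : PySem.Dict Int (List Int)) (st : PvSt) (node : Int) : PvSt :=
  (g.getD node []).foldl (pvInner node) st

-- B-side primitives
def pvInnerB (u : Int) (st : PvStB) (n : Int) : PvStB :=
  if st.2.contains n then st else (st.1 ++ [n], st.2.insert n u)

def pvEdgeStep (u : Int) (st : PvStB) (e : Int × Int) : PvStB :=
  let st1 := if e.1 == u && !st.2.contains e.2 then (st.1 ++ [e.2], st.2.insert e.2 u) else st
  if e.2 == u && !st1.2.contains e.1 then (st1.1 ++ [e.1], st1.2.insert e.1 u) else st1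

-- graph-build primitives
def pvStepA (d : PySem.Dict Int (List Int)) (a b : Int) : PySem.Dict Int (List Int) :=
  let d1 := if d.contains a then d else d.insert a []
  let d2 := if d1.contains b then d1 else d1.insert b []
  let d3 := d2.insert a (d2.getD a [] ++ [b])
  d3.insert b (d3.getD b [] ++ [a])

def pvStepB (d : PySem.Dict Int (List Int)) (a b : Int) : PySem.Dict Int (List Int) :=
  (d.modify a [] (· ++ [b])).modify b [] (· ++ [a])

def pvGraph (E : List (Int × Int)) : PySem.Dict Int (List Int) :=
  E.foldl (fun d e => pvStepB d e.1 e.2) PySem.Dict.empty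

def pvDEdges (E : List (Int × Int)) : List (Int × Int) :=
  E.flatMap (fun e => [(e.1, e.2), (e.2, e.1)])

def pvSegs (u : Int) (e : Int × Int) : List Int :=
  (if e.1 = u then [e.2] else []) ++ (if e.2 = u then [e.1] else [])

-- ===== graph-build equality (A's membership-test build = B-side modify build) =====

lemma pvMap_overwrite_id (d : PySem.Dict Int (List Int)) (k : Int) (v : List Int)
    (h : d.contains k = false) :
    d.items.map (fun p => if p.1 == k then (k, v) else p) = d.items := by
  have hk : ∀ p ∈ d.items, p.1 ≠ k := by
    intro p hp hpk
    have : d.contains k = true := (PySem.Dict.contains_iff_mem_keys d k).mpr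
      (by simp only [PySem.Dict.keys]; exact List.mem_map.mpr ⟨p, hp, hpk⟩)
    simp [this] at h
  calc d.items.map (fun p => if p.1 == k then (k, v) else p)
      = d.items.map id := List.map_congr_left (fun p hp => by simp [id, hk p hp])
    _ = d.items := List.map_id _

lemma pvIns_ins_self (d : PySem.Dict Int (List Int)) (k : Int) (v w : List Int) :
    (d.insert k v).insert k w = d.insert k w := by
  apply PySem.Dict.ext
  by_cases hc : d.contains k
  · rw [PySem.Dict.items_insert_of_contains _ _ (PySem.Dict.contains_insert_self d k v),
        PySem.Dict.items_insert_of_contains _ _ hc,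
        PySem.Dict.items_insert_of_contains _ _ hc, List.map_map]
    apply List.map_congr_left
    intro p _
    by_cases hp : p.1 = k <;> simp [hp]
  · rw [PySem.Dict.items_insert_of_contains _ _ (PySem.Dict.contains_insert_self d k v),
        PySem.Dict.items_insert_of_not_contains _ _ (by simpa using hc),
        PySem.Dict.items_insert_of_not_contains _ _ (by simpa using hc),
        List.map_append, pvMap_overwrite_id d k w (by simpa using hc)]
    simp

lemma pvInsert_swap_fresh (d : PySem.Dict Int (List Int)) (a b : Int) (w v w' : List Int)
    (ha : d.contains a = true) (hb : d.contains b = false) (hab : a ≠ b) :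
    ((d.insert b w).insert a v).insert b w' = (d.insert a v).insert b w' := by
  apply PySem.Dict.ext
  have hba : (b == a) = false := by simp [hab.symm]
  have hab' : (a == b) = false := by simp [hab]
  have hcba : (d.insert b w).contains a = true := by
    rw [PySem.Dict.contains_insert]; simp [ha]
  have hcbb : ((d.insert b w).insert a v).contains b = true := by
    rw [PySem.Dict.contains_insert, PySem.Dict.contains_insert]; simp
  have hcab : (d.insert a v).contains b = false := by
    rw [PySem.Dict.contains_insert]; simp [hba, hb]
  rw [PySem.Dict.items_insert_of_contains _ _ hcbb,
      PySem.Dict.items_insert_of_contains _ _ hcba,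
      PySem.Dict.items_insert_of_not_contains _ _ hb,
      PySem.Dict.items_insert_of_not_contains _ _ hcab,
      PySem.Dict.items_insert_of_contains _ _ ha]
  rw [List.map_append, List.map_append]
  simp only [List.map_cons, List.map_nil, hba]
  simp only [Bool.false_eq_true, if_false]
  congr 1
  · rw [List.map_map]
    apply List.map_congr_left
    intro p hp
    have hpb : p.1 ≠ b := by
      intro hpk
      have : d.contains b = true := (PySem.Dict.contains_iff_mem_keys d b).mpr
        (by simp only [PySem.Dict.keys]; exact List.mem_map.mpr ⟨p, hp, hpk⟩)
      simp [this] at hb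
    by_cases hpa : p.1 = a
    · simp only [Function.comp, hpa, beq_self_eq_true, if_true, hab', Bool.false_eq_true, if_false]
    · simp [hpa, hpb]
  · simp

lemma pvStepAB (d : PySem.Dict Int (List Int)) (a b : Int) : pvStepA d a b = pvStepB d a b := by
  have hmod : pvStepB d a b
      = (d.insert a (d.getD a [] ++ [b])).insert b
          ((d.insert a (d.getD a [] ++ [b])).getD b [] ++ [a]) := rfl
  by_cases hab : a = b
  · subst hab
    by_cases ca : d.contains a
    · simp only [pvStepA, ca, if_true, hmod]
    · have ca' : d.contains a = false := by simpa using ca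
      simp only [pvStepA, ca, if_false, hmod, Bool.false_eq_true]
      rw [PySem.Dict.contains_insert_self]
      simp only [if_true]
      rw [PySem.Dict.getD_of_not_contains d [] ca']
      simp only [PySem.Dict.getD_insert_self, pvIns_ins_self]
  · by_cases cb : d.contains b
    · have he2 : (if (if d.contains a then d else d.insert a []).contains b
          then (if d.contains a then d else d.insert a [])
          else (if d.contains a then d else d.insert a []).insert b [])
          = (if d.contains a then d else d.insert a []) := by
        by_cases ca : d.contains a
        · simp [ca, cb]
        · have : (d.insert a ([] : List Int)).contains b = true := by
            rw [PySem.Dict.contains_insert]; simp [cb]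
          simp [ca, this]
      simp only [pvStepA, he2, hmod]
      by_cases ca : d.contains a
      · simp only [ca, if_true]
      · have ca' : d.contains a = false := by simpa using ca
        simp only [ca, if_false, Bool.false_eq_true]
        rw [PySem.Dict.getD_insert_self,
            PySem.Dict.getD_of_not_contains d [] ca',
            pvIns_ins_self]
    · have cb' : d.contains b = false := by simpa using cb
      have hba : b ≠ a := fun h => hab h.symm
      by_cases ca : d.contains a
      · simp only [pvStepA, ca, if_true, cb, if_false, Bool.false_eq_true, hmod]
        rw [PySem.Dict.getD_insert_of_ne _ _ _ hab]
        rw [PySem.Dict.getD_insert_of_ne _ _ _ hba]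
        rw [PySem.Dict.getD_insert_self]
        rw [PySem.Dict.getD_insert_of_ne _ _ _ hba]
        rw [PySem.Dict.getD_of_not_contains d [] cb']
        exact pvInsert_swap_fresh d a b [] (d.getD a [] ++ [b]) ([] ++ [a]) ca cb' hab
      · have ca' : d.contains a = false := by simpa using ca
        have he1ca : (d.insert a ([] : List Int)).contains a = true := PySem.Dict.contains_insert_self d a []
        have he1cb : (d.insert a ([] : List Int)).contains b = false := by
          rw [PySem.Dict.contains_insert]; simp [hba, cb']
        simp only [pvStepA, ca, if_false, Bool.false_eq_true, hmod]
        rw [if_neg (by simp [he1cb])]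
        rw [PySem.Dict.getD_insert_of_ne _ _ _ hab,
            PySem.Dict.getD_insert_self,
            PySem.Dict.getD_insert_of_ne _ _ _ hba,
            PySem.Dict.getD_insert_self,
            PySem.Dict.getD_of_not_contains d [] ca']
        rw [PySem.Dict.getD_insert_of_ne _ _ _ hba]
        rw [PySem.Dict.getD_of_not_contains d [] cb']
        rw [pvInsert_swap_fresh (d.insert a []) a b [] ([] ++ [b]) ([] ++ [a]) he1ca he1cb hab,
            pvIns_ins_self]

-- ===== pvGraph viewed as a fold of single (directed-edge) modifies =====

lemma pvGraph_dedges_aux (E : List (Int × Int)) :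
    ∀ d, E.foldl (fun d e => pvStepB d e.1 e.2) d
      = (pvDEdges E).foldl (fun d p => d.modify p.1 [] (· ++ [p.2])) d := by
  induction E with
  | nil => intro d; rfl
  | cons e E ih =>
      intro d
      simp only [pvDEdges, List.flatMap_cons, List.foldl_append, List.foldl_cons, List.foldl_nil]
      exact ih _

lemma pvGraph_dedges (E : List (Int × Int)) :
    pvGraph E = (pvDEdges E).foldl (fun d p => d.modify p.1 [] (· ++ [p.2])) PySem.Dict.empty :=
  pvGraph_dedges_aux E PySem.Dict.empty

lemma pvSegs_eq_filter (u : Int) (E : List (Int × Int)) :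
    ((pvDEdges E).filter (fun p => p.1 == u)).map (·.2) = E.flatMap (pvSegs u) := by
  induction E with
  | nil => rfl
  | cons e E ih =>
      simp only [pvDEdges, List.flatMap_cons, List.filter_append, List.map_append] at *
      rw [ih]
      congr 1
      by_cases h1 : e.1 = u <;> by_cases h2 : e.2 = u <;>
        simp [pvSegs, h1, h2]

lemma pvGraph_getD (E : List (Int × Int)) (u : Int) :
    (pvGraph E).getD u [] = E.flatMap (pvSegs u) := by
  rw [pvGraph_dedges, PySem.Dict.getD_foldl_modify_append, PySem.Dict.getD_empty]
  simpa using pvSegs_eq_filter u E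

lemma pvGraph_keys (E : List (Int × Int)) :
    (pvGraph E).keys = PySem.Set.ofList ((pvDEdges E).map (·.1)) := by
  rw [pvGraph_dedges]
  rw [PySem.Dict.keys_foldl_modify_key (pvDEdges E) (·.1) [] (fun d p => (· ++ [p.2])) PySem.Dict.empty]
  simp [PySem.Dict.keys_empty, PySem.Set.update_nil_left]

lemma pvDEdges_length (E : List (Int × Int)) : (pvDEdges E).length = 2 * E.length := by
  induction E with
  | nil => rfl
  | cons e E ih => simp [pvDEdges, List.flatMap_cons] at *; omega

-- closedness: every neighbour is a key of the graph
def pvClosed (g : PySem.Dict Int (List Int)) (U : List Int) : Prop :=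
  ∀ u v, v ∈ g.getD u [] → v ∈ U

lemma pvGraph_closed (E : List (Int × Int)) : pvClosed (pvGraph E) (pvGraph E).keys := by
  intro u v hv
  rw [pvGraph_getD] at hv
  rw [pvGraph_keys, PySem.Set.mem_ofList]
  rcases List.mem_flatMap.mp hv with ⟨e, heE, hve⟩
  simp only [pvSegs, List.mem_append] at hve
  rcases hve with h | h
  · by_cases h1 : e.1 = u
    · simp [h1] at h
      subst h
      exact List.mem_map.mpr ⟨(e.2, e.1), List.mem_flatMap.mpr ⟨e, heE, by simp⟩, rfl⟩
    · simp [h1] at h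
  · by_cases h2 : e.2 = u
    · simp [h2] at h
      subst h
      exact List.mem_map.mpr ⟨(e.1, e.2), List.mem_flatMap.mpr ⟨e, heE, by simp⟩, rfl⟩
    · simp [h2] at h

-- ===== fuel measure for bfsA =====

def pvUnseen (U : List Int) (s : PySem.Set Int) : Nat :=
  (U.filter (fun k => !(PySem.Set.contains s k))).length

def pvMu (U : List Int) (q : List Int) (s : PySem.Set Int) : Nat :=
  q.length + pvUnseen U s

lemma pvUnseen_add_lt (U : List Int) (s : PySem.Set Int) (n : Int)
    (hn : n ∈ U) (hs : PySem.Set.contains s n = false) :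
    pvUnseen U (s.add n) < pvUnseen U s := by
  have hadd : PySem.Set.add s n = s ++ [n] := by
    simp [PySem.Set.add, PySem.Set.contains] at hs ⊢
    simp [hs]
  have hpred : ∀ k : Int, (!(PySem.Set.contains (s.add n) k)) = ((!(PySem.Set.contains s k)) && !(k == n)) := by
    intro k
    simp [hadd, PySem.Set.contains, List.contains_eq_mem]
    by_cases hk : k ∈ s <;> by_cases hkn : k = n <;> simp [hk, hkn]
  unfold pvUnseen
  have : U.filter (fun k => !(PySem.Set.contains (s.add n) k))
      = (U.filter (fun k => !(PySem.Set.contains s k))).filter (fun k => !(k == n)) := by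
    rw [List.filter_filter]
    exact List.filter_congr (fun k _ => by rw [hpred k, Bool.and_comm])
  rw [this]
  apply List.length_filter_lt_length_iff_exists.mpr
  refine ⟨n, ?_, by simp⟩
  simp [List.mem_filter, hn, PySem.Set.contains] at hs ⊢
  simpa [PySem.Set.contains] using hs

lemma pvInner_mu (U : List Int) (node : Int) (st : PvSt) (n : Int) (hn : n ∈ U) :
    pvMu U (pvInner node st n).1 (pvInner node st n).2.1 ≤ pvMu U st.1 st.2.1 := by
  rcases st with ⟨q, s, p⟩
  by_cases h : n ∈ s
  · simp [pvInner, h]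
  · have hlt := pvUnseen_add_lt U s n hn (by simp [PySem.Set.contains, List.contains_eq_mem, h])
    simp only [pvInner, PySem.Set.contains, List.contains_eq_mem, h, decide_false, Bool.false_eq_true, if_false]
    simp only [pvMu, List.length_append, List.length_cons, List.length_nil]
    omega

lemma pvFold_mu (U : List Int) (node : Int) (ns : List Int) (st : PvSt)
    (h : ∀ n ∈ ns, n ∈ U) :
    pvMu U (ns.foldl (pvInner node) st).1 (ns.foldl (pvInner node) st).2.1 ≤ pvMu U st.1 st.2.1 := by
  induction ns generalizing st with
  | nil => simp
  | cons n ns ih =>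
    simp only [List.foldl_cons]
    exact Nat.le_trans (ih (pvInner node st n) (fun m hm => h m (List.mem_cons_of_mem _ hm)))
      (pvInner_mu U node st n (h n List.mem_cons_self))

lemma pvStep_mu (U : List Int) (g : PySem.Dict Int (List Int)) (st : PvSt) (node : Int)
    (hC : pvClosed g U) :
    pvMu U (pvStep g st node).1 (pvStep g st node).2.1 ≤ pvMu U st.1 st.2.1 :=
  pvFold_mu U node _ st (fun n hn => hC node n hn)

lemma pvGuard (g : PySem.Dict Int (List Int)) (st : PvSt) (node : Int) :
    (if g.contains node then (g.getD node []).foldl (pvInner node) st else st) = pvStep g st node := by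
  by_cases h : g.contains node
  · simp [pvStep, h]
  · have : g.getD node [] = [] := PySem.Dict.getD_of_not_contains g [] (by simpa using h)
    simp [pvStep, h, this]

lemma bfsA_cons (g : PySem.Dict Int (List Int)) (f : Nat) (node : Int) (q : List Int)
    (s : PySem.Set Int) (p : PySem.Dict Int Int) :
    bfsA g (f + 1) (node :: q) s p
      = bfsA g f (pvStep g (q, s, p) node).1 (pvStep g (q, s, p) node).2.1 (pvStep g (q, s, p) node).2.2 := by
  rw [bfsA]
  rw [show (fun (st : List Int × PySem.Set Int × PySem.Dict Int Int) n =>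
        if st.2.1.contains n then st
        else (st.1 ++ [n], st.2.1.add n, st.2.2.insert n node)) = pvInner node from rfl]
  rw [pvGuard]

lemma bfsA_stab (g : PySem.Dict Int (List Int)) (U : List Int) (hC : pvClosed g U) :
    ∀ (f : Nat) (q : List Int) (s : PySem.Set Int) (p : PySem.Dict Int Int),
    pvMu U q s ≤ f → bfsA g (f + 1) q s p = bfsA g f q s p := by
  intro f
  induction f with
  | zero =>
    intro q s p h
    have hq : q = [] := by
      cases q with
      | nil => rfl
      | cons a q => simp [pvMu] at h
    subst hq; rfl
  | succ f ih =>
    intro q s p h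
    cases q with
    | nil => rfl
    | cons a q =>
      rw [bfsA_cons, bfsA_cons]
      rcases hr : pvStep g (q, s, p) a with ⟨q', s', p'⟩
      have hmu : pvMu U q' s' ≤ f := by
        have h1 := pvStep_mu U g (q, s, p) a hC
        rw [hr] at h1
        simp only at h1
        have h2 : pvMu U (a :: q) s = pvMu U q s + 1 := by simp [pvMu]; omega
        omega
      exact ih q' s' p' hmu

lemma bfsA_fuel (g : PySem.Dict Int (List Int)) (U : List Int) (hC : pvClosed g U)
    (f f' : Nat) (q : List Int) (s : PySem.Set Int) (p : PySem.Dict Int Int)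
    (h : pvMu U q s ≤ f) (h' : pvMu U q s ≤ f') : bfsA g f q s p = bfsA g f' q s p := by
  have key : ∀ (d f : Nat), pvMu U q s ≤ f → bfsA g (f + d) q s p = bfsA g f q s p := by
    intro d
    induction d with
    | zero => intro f _; rfl
    | succ d ih =>
      intro f hf
      have : f + (d + 1) = (f + d) + 1 := by omega
      rw [this, bfsA_stab g U hC (f + d) q s p (by omega), ih f hf]
  rcases Nat.le_total f f' with hle | hle
  · have : f' = f + (f' - f) := by omega
    rw [this, key (f' - f) f h]
  · have : f = f' + (f - f') := by omega
    rw [this, key (f - f') f' h']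

-- ===== lockstep: A's set-guarded expansion = B's parent-guarded expansion =====

def pvRel (s : PySem.Set Int) (p : PySem.Dict Int Int) : Prop :=
  ∀ n, PySem.Set.contains s n = p.contains n

lemma pvInner_lock (u : Int) (q : List Int) (s : PySem.Set Int) (p : PySem.Dict Int Int)
    (h : pvRel s p) (n : Int) :
    pvInnerB u (q, p) n = ((pvInner u (q, s, p) n).1, (pvInner u (q, s, p) n).2.2)
    ∧ pvRel (pvInner u (q, s, p) n).2.1 (pvInner u (q, s, p) n).2.2 := by
  by_cases hc : p.contains n
  · have hmem : n ∈ s := (PySem.Set.contains_iff s n).mp ((h n).trans hc)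
    constructor
    · simp [pvInnerB, pvInner, hc, hmem]
    · simpa [pvInner, hmem] using h
  · have hc' : p.contains n = false := by simpa using hc
    have hmem : n ∉ s := fun hm => by
      have := (h n).symm.trans ((PySem.Set.contains_iff s n).mpr hm)
      simp [this] at hc'
    have hgoal : pvRel (s.add n) (p.insert n u) := by
      intro m
      have hadd : PySem.Set.add s n = s ++ [n] := PySem.Set.add_of_not_mem hmem
      rw [hadd, PySem.Dict.contains_insert]
      by_cases hm : m = n
      · subst hm
        simp [PySem.Set.contains, List.contains_eq_mem]
      · have hmn : (m == n) = false := by simp [hm]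
        simp only [PySem.Set.contains, List.contains_eq_mem, List.mem_append,
          List.mem_singleton, hm, or_false, hmn, Bool.false_or]
        simpa [PySem.Set.contains, List.contains_eq_mem] using h m
    constructor
    · simp [pvInnerB, pvInner, hc', hmem]
    · simpa [pvInner, hmem] using hgoal

lemma pvFold_lock (u : Int) (ns : List Int) :
    ∀ (q : List Int) (s : PySem.Set Int) (p : PySem.Dict Int Int), pvRel s p →
    ns.foldl (pvInnerB u) (q, p)
      = ((ns.foldl (pvInner u) (q, s, p)).1, (ns.foldl (pvInner u) (q, s, p)).2.2)
    ∧ pvRel (ns.foldl (pvInner u) (q, s, p)).2.1 (ns.foldl (pvInner u) (q, s, p)).2.2 := by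
  induction ns with
  | nil => intro q s p h; exact ⟨rfl, h⟩
  | cons n ns ih =>
    intro q s p h
    obtain ⟨he, hr⟩ := pvInner_lock u q s p h n
    simp only [List.foldl_cons, he]
    rcases hst : pvInner u (q, s, p) n with ⟨q1, s1, p1⟩
    rw [hst] at hr
    exact ih q1 s1 p1 hr

lemma pvEdgeStep_segs (u : Int) (e : Int × Int) (st : PvStB) :
    pvEdgeStep u st e = (pvSegs u e).foldl (pvInnerB u) st := by
  rcases e with ⟨a, b⟩
  rcases st with ⟨q, p⟩
  by_cases h1 : a = u
  · by_cases h2 : b = u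
    · by_cases hc : p.contains u
      · simp [pvEdgeStep, pvSegs, pvInnerB, h1, h2, hc]
      · simp [pvEdgeStep, pvSegs, pvInnerB, h1, h2, hc, PySem.Dict.contains_insert_self]
    · by_cases hc : p.contains b
      · simp [pvEdgeStep, pvSegs, pvInnerB, h1, hc, h2]
      · simp [pvEdgeStep, pvSegs, pvInnerB, h1, hc, h2]
  · by_cases h2 : b = u
    · by_cases hc : p.contains a
      · simp [pvEdgeStep, pvSegs, pvInnerB, h2, hc, h1]
      · simp [pvEdgeStep, pvSegs, pvInnerB, h2, hc, h1]
    · simp [pvEdgeStep, pvSegs, h1, h2]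

lemma pvEdgeFold_segs (u : Int) (E : List (Int × Int)) :
    ∀ st : PvStB, E.foldl (pvEdgeStep u) st = (E.flatMap (pvSegs u)).foldl (pvInnerB u) st := by
  induction E with
  | nil => intro st; rfl
  | cons e E ih =>
    intro st
    simp only [List.foldl_cons, List.flatMap_cons, List.foldl_append, pvEdgeStep_segs]
    exact ih _

lemma bfs_lock (g : PySem.Dict Int (List Int)) (E : List (Int × Int))
    (hadj : ∀ u, g.getD u [] = E.flatMap (pvSegs u)) :
    ∀ (f : Nat) (q : List Int) (s : PySem.Set Int) (p : PySem.Dict Int Int), pvRel s p →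
    bfsA g f q s p = bfsAlt E f q p := by
  intro f
  induction f with
  | zero => intro q s p _; rfl
  | succ f ih =>
    intro q s p h
    cases q with
    | nil => rfl
    | cons u q =>
      rw [bfsA_cons]
      have hB : bfsAlt E (f + 1) (u :: q) p
          = bfsAlt E f (E.foldl (pvEdgeStep u) (q, p)).1 (E.foldl (pvEdgeStep u) (q, p)).2 := rfl
      rw [hB, pvEdgeFold_segs]
      have hstep : pvStep g (q, s, p) u = (E.flatMap (pvSegs u)).foldl (pvInner u) (q, s, p) := by
        rw [pvStep, hadj u]
      obtain ⟨he, hr⟩ := pvFold_lock u (E.flatMap (pvSegs u)) q s p h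
      rw [hstep, he]
      exact ih _ _ _ hr

-- ===== assembling the two Mains =====

lemma pvRel_init : pvRel (PySem.Set.add PySem.Set.empty 1) (PySem.Dict.empty.insert 1 0) := by
  intro n
  rw [PySem.Dict.contains_insert]
  by_cases hn : n = 1 <;>
    simp [PySem.Set.add, PySem.Set.empty, PySem.Set.contains, PySem.Dict.contains_empty, hn]

lemma pvMu_bounds (E : List (Int × Int)) (s : PySem.Set Int) :
    pvMu (pvGraph E).keys [1] s ≤ 2 * (pvGraph E).size + 1
    ∧ pvMu (pvGraph E).keys [1] s ≤ 2 * E.length + 1 := by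
  have h1 : pvUnseen (pvGraph E).keys s ≤ (pvGraph E).keys.length := List.length_filter_le _ _
  have h2 : (pvGraph E).keys.length = (pvGraph E).size := by
    simp [PySem.Dict.keys, PySem.Dict.size]
  have h3 : (pvGraph E).keys.length ≤ 2 * E.length := by
    rw [pvGraph_keys]
    calc (PySem.Set.ofList ((pvDEdges E).map (·.1))).length
        ≤ ((pvDEdges E).map (·.1)).length := PySem.Set.length_ofList_le _
      _ = 2 * E.length := by rw [List.length_map, pvDEdges_length]
  constructor <;> (simp only [pvMu, List.length_cons, List.length_nil]; omega)

theorem pvMainEq (N M : Int) (A B : List Int) : Main N M A B = Main_alt N M A B := by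
  have hstepA : (fun (g : PySem.Dict Int (List Int)) i =>
      let a := PySem.List.pyGetD A i 0
      let b := PySem.List.pyGetD B i 0
      let g := if g.contains a then g else g.insert a []
      let g := if g.contains b then g else g.insert b []
      let g := g.insert a (g.getD a [] ++ [b])
      g.insert b (g.getD b [] ++ [a]))
      = (fun (g : PySem.Dict Int (List Int)) i => pvStepB g (PySem.List.pyGetD A i 0) (PySem.List.pyGetD B i 0)) := by
    funext g i
    exact pvStepAB g (PySem.List.pyGetD A i 0) (PySem.List.pyGetD B i 0)
  have hgraph : (PySem.List.pyRange 0 M 1).foldl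
      (fun (g : PySem.Dict Int (List Int)) i =>
        let a := PySem.List.pyGetD A i 0
        let b := PySem.List.pyGetD B i 0
        let g := if g.contains a then g else g.insert a []
        let g := if g.contains b then g else g.insert b []
        let g := g.insert a (g.getD a [] ++ [b])
        g.insert b (g.getD b [] ++ [a]))
      PySem.Dict.empty = pvGraph (pvEdges M A B) := by
    rw [hstepA, pvGraph, pvEdges, List.foldl_map]
  show ("Yes", (PySem.List.pyRange 2 (N + 1) 1).foldl
      (fun ans i => ans ++ [(bfsA _ _ [1] (PySem.Set.add PySem.Set.empty 1) (PySem.Dict.empty.insert 1 0)).getD i 0]) [])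
    = Main_alt N M A B
  rw [hgraph]
  have hE : (PySem.List.pyRange 0 M 1).map
      (fun i => (PySem.List.pyGetD A i 0, PySem.List.pyGetD B i 0)) = pvEdges M A B := rfl
  have hbounds := pvMu_bounds (pvEdges M A B) (PySem.Set.add PySem.Set.empty 1)
  have hfuel := bfsA_fuel (pvGraph (pvEdges M A B)) (pvGraph (pvEdges M A B)).keys
    (pvGraph_closed (pvEdges M A B))
    (2 * (pvGraph (pvEdges M A B)).size + 1) (2 * (pvEdges M A B).length + 1)
    [1] (PySem.Set.add PySem.Set.empty 1) (PySem.Dict.empty.insert 1 0)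
    hbounds.1 hbounds.2
  have hlock := bfs_lock (pvGraph (pvEdges M A B)) (pvEdges M A B)
    (pvGraph_getD (pvEdges M A B))
    (2 * (pvEdges M A B).length + 1) [1]
    (PySem.Set.add PySem.Set.empty 1) (PySem.Dict.empty.insert 1 0) pvRel_init
  show _ = ("Yes", (PySem.List.pyRange 2 (N + 1) 1).map
      (fun i => (bfsAlt (pvEdges M A B) (2 * (pvEdges M A B).length + 1) [1]
        (PySem.Dict.empty.insert 1 0)).getD i 0))
  rw [hfuel, hlock, PySem.List.foldl_append_singleton_eq_map]
  simp only [List.nil_append]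

-- ===== VERDICT (by name: the statement is the Claim_ definition above) =====
theorem Main_spec : Claim_equal_Main := by
  intro N M A B _ _
  exact pvMainEq N M A B
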